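-- pv_equiv track=rewrite | github.com/WyattBlair77/Stevens | EMT-678/Final Project/gutenberg_download.py | remove_funny_tokens
-- ===== SOURCE A (Python) =====
-- def remove_funny_tokens(text: str) -> str:
--     replacements = {
--         'xe2x80x9c': ' ',
--         'xe2x80x9d': ' ',
--         'xe2x80x94': ' ',
--         'xe2x80x99': "'",
--         'xe2x80x98': "'"
--     }
--     for k, v in replacements.items():
--         text = text.replace(k, v)
--     return ' '.join(text.split())
-- ===== SOURCE B (Python) =====
-- import re
--
-- def remove_funny_tokens(text: str) -> str:
--     replacements = {
--         'xe2x80x9c': ' ',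
--         'xe2x80x9d': ' ',
--         'xe2x80x94': ' ',
--         'xe2x80x99': "'",
--         'xe2x80x98': "'"
--     }
--     # one single pass: the five keys never overlap and their replacements
--     # can never create a new key, so this equals the five sequential passes
--     text = re.sub('xe2x80x9c|xe2x80x9d|xe2x80x94|xe2x80x99|xe2x80x98',
--                   lambda m: replacements[m.group()], text)
--     return ' '.join(text.split())
-- ===== Notes on version B (the rewrite author's own statement) =====
-- stated objective: idiomatic
-- what changed: The five sequential full-string str.replace passes are fused into one single left-to-right pass (re.sub over an alternation of the five byte-sequence literals with a dict-lookup callback); the whitespace normalisation step is unchanged.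
import Mathlib
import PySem

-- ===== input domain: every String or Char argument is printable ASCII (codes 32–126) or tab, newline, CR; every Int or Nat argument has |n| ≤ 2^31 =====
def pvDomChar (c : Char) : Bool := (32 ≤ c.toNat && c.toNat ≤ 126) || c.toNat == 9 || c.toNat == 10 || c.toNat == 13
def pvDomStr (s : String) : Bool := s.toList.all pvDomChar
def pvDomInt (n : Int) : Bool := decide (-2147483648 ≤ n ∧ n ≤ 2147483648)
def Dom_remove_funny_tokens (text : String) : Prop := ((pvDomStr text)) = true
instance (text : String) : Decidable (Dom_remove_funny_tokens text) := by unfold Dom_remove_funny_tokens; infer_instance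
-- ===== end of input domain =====

-- B fuses A's five sequential str.replace passes into one single left-to-right pass
-- (re.sub over an alternation of the five literals); the whitespace step is unchanged.

-- ===== PORT A =====
-- the dict literal, the replace loop over its items, then ' '.join(text.split())
def remove_funny_tokens (text : String) : String :=
  PySem.Str.join " " (PySem.Str.split₀
    (((((((PySem.Dict.empty : PySem.Dict String String).insert "xe2x80x9c" " ").insert
        "xe2x80x9d" " ").insert "xe2x80x94" " ").insert "xe2x80x99" "'").insert
        "xe2x80x98" "'").items.foldl (fun t kv => PySem.Str.replace t kv.1 kv.2) text))

-- ===== PORT B =====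
-- the five alternatives of the regex share the 8-char stem "xe2x80x9"
def pvTok (j : Char) : List Char := ['x', 'e', '2', 'x', '8', '0', 'x', '9', j]

-- single left-to-right pass: at each position try the five regex alternatives in
-- pattern order (what re.sub with the alternation does), else copy the character
def pvSub : List Char → List Char
  | [] => []
  | c :: t =>
    if (pvTok 'c').isPrefixOf (c :: t) then ' ' :: pvSub (t.drop 8)
    else if (pvTok 'd').isPrefixOf (c :: t) then ' ' :: pvSub (t.drop 8)
    else if (pvTok '4').isPrefixOf (c :: t) then ' ' :: pvSub (t.drop 8)
    else if (pvTok '9').isPrefixOf (c :: t) then '\'' :: pvSub (t.drop 8)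
    else if (pvTok '8').isPrefixOf (c :: t) then '\'' :: pvSub (t.drop 8)
    else c :: pvSub t
termination_by l => l.length
decreasing_by all_goals simp [List.length_drop]


def remove_funny_tokens_alt (text : String) : String :=
  PySem.Str.join " " (PySem.Str.split₀ (String.ofList (pvSub text.toList)))

-- ===== PRECONDITION & SPEC =====
def Spec_remove_funny_tokens (text : String) (out : String) : Prop := out = remove_funny_tokens_alt text
instance (text : String) (out : String) : Decidable (Spec_remove_funny_tokens text out) := by unfold Spec_remove_funny_tokens; infer_instance

-- ===== CLAIM (what is proved, stated in full; the proofs are below) =====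
def Claim_equal_remove_funny_tokens : Prop := ∀ (text : String), Dom_remove_funny_tokens text → Spec_remove_funny_tokens text (remove_funny_tokens text)

-- ===== LEMMAS AND PROOFS =====

-- recursive characterization of PySem.Chars.replace (for nonempty `old`)
def pvRep (old new : List Char) : List Char → List Char
  | [] => []
  | c :: t =>
    if old.isPrefixOf (c :: t) then new ++ pvRep old new (t.drop (old.length - 1))
    else c :: pvRep old new t
termination_by l => l.length
decreasing_by all_goals simp [List.length_drop]

theorem pvRep_go (old new : List Char) : ∀ (fuel : Nat) (l acc : List Char), old ≠ [] → l.length ≤ fuel →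
    PySem.Chars.replace.go old new fuel l acc = acc.reverse ++ pvRep old new l := by
  intro fuel
  induction fuel with
  | zero =>
    intro l acc hold hl
    have : l = [] := by cases l <;> simp_all
    subst this
    simp [PySem.Chars.replace.go, pvRep]
  | succ n ih =>
    intro l acc hold hl
    cases l with
    | nil => simp [PySem.Chars.replace.go, pvRep]
    | cons c t =>
      rw [PySem.Chars.replace.go]
      by_cases hp : old.isPrefixOf (c :: t) = true
      · rw [if_pos hp]
        obtain ⟨k, hk⟩ : ∃ k, old.length = k + 1 := by
          cases old with
          | nil => simp at hold
          | cons a as => exact ⟨as.length, rfl⟩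
        have hdrop : List.drop old.length (c :: t) = t.drop (old.length - 1) := by
          rw [hk]; simp
        rw [hdrop, ih _ _ hold (by simp at hl ⊢; omega), pvRep]
        simp [hp]
      · rw [if_neg hp, ih _ _ hold (by simp at hl ⊢; omega), pvRep]
        simp [hp]

theorem replace_eq (s old new : List Char) (h : old ≠ []) :
    PySem.Chars.replace s old new = pvRep old new s := by
  rw [PySem.Chars.replace]
  have : old.isEmpty = false := by cases old <;> simp_all
  rw [this]
  simpa using pvRep_go old new s.length s [] h le_rfl


-- the five tokens, all proper suffixes of a token (the stem never re-aligns with itself)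
def pvTails : List Char := ['c', 'd', '4', '9', '8']
def pvSuf (j : Char) : List (List Char) :=
  [['x','e','2','x','8','0','x','9',j], ['e','2','x','8','0','x','9',j], ['2','x','8','0','x','9',j],
   ['x','8','0','x','9',j], ['8','0','x','9',j], ['0','x','9',j], ['x','9',j], ['9',j], [j]]


-- a token of x never matches at or inside an occurrence of a different token j
theorem pvMismatch (x j : Char) (hj : j ∈ pvTails) (hxj : x ≠ j) (w : List Char)
    (hw : w ∈ pvSuf j) (u : List Char) : (pvTok x).isPrefixOf (w ++ u) = false := by
  fin_cases hw <;> fin_cases hj <;> simp [pvTok, List.isPrefixOf, hxj]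


theorem pvRep_nil (old new : List Char) : pvRep old new [] = [] := by simp [pvRep]

theorem pvRep_cons_pos (old new : List Char) (c : Char) (t : List Char)
    (h : old.isPrefixOf (c :: t) = true) :
    pvRep old new (c :: t) = new ++ pvRep old new (t.drop (old.length - 1)) := by
  rw [pvRep]; simp [h]

theorem pvRep_cons_neg (old new : List Char) (c : Char) (t : List Char)
    (h : old.isPrefixOf (c :: t) = false) :
    pvRep old new (c :: t) = c :: pvRep old new t := by
  rw [pvRep]; simp [h]

theorem pvSuf_shape (j : Char) (hj : j ∈ pvTails) (w : List Char) (hw : w ∈ pvSuf j) :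
    ∃ ch w', w = ch :: w' ∧ (w' ∈ pvSuf j ∨ w' = []) ∧ ch ≠ ' ' ∧ ch ≠ '\'' := by
  fin_cases hw <;> fin_cases hj <;> exact ⟨_, _, rfl, by simp [pvSuf], by decide, by decide⟩


-- replacing token x (by ' ' or the quote) never creates a new token occurrence at the front
theorem pvNoCreate (x j vc : Char) (hj : j ∈ pvTails) (hv : vc = ' ' ∨ vc = '\'') :
    ∀ (s w : List Char), (w ∈ pvSuf j ∨ w = []) →
      w.isPrefixOf (pvRep (pvTok x) [vc] s) = true → w.isPrefixOf s = true := by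
  intro s
  induction s with
  | nil =>
    intro w hm h
    rcases hm with hm | rfl
    · obtain ⟨ch, w', rfl, _, _, _⟩ := pvSuf_shape j hj w hm
      rw [pvRep_nil] at h
      simp at h
    · simp [List.isPrefixOf]
  | cons c t ih =>
    intro w hm h
    rcases hm with hm | rfl
    · obtain ⟨ch, w', rfl, hm', h1, h2⟩ := pvSuf_shape j hj w hm
      by_cases hp : (pvTok x).isPrefixOf (c :: t) = true
      · rw [pvRep_cons_pos _ _ _ _ hp] at h
        simp [pvTok, List.cons_prefix_cons] at h
        rcases hv with rfl | rfl
        · exact absurd h.1 h1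
        · exact absurd h.1 h2
      · rw [pvRep_cons_neg _ _ _ _ (by simp only [Bool.not_eq_true] at hp; exact hp)] at h
        simp [List.cons_prefix_cons] at h ⊢
        refine ⟨h.1, ?_⟩
        have := ih w' hm' (by simpa using h.2)
        simpa using this
    · simp [List.isPrefixOf]

theorem pvRep_vc (x vc : Char) (hv : vc = ' ' ∨ vc = '\'') (v X : List Char) :
    pvRep (pvTok x) v (vc :: X) = vc :: pvRep (pvTok x) v X := by
  apply pvRep_cons_neg
  rcases hv with rfl | rfl <;> simp [pvTok, List.isPrefixOf]

theorem pvSelf (j : Char) (v u : List Char) :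
    pvRep (pvTok j) v (pvTok j ++ u) = v ++ pvRep (pvTok j) v u := by
  simp only [pvTok, List.cons_append, List.nil_append]
  rw [pvRep_cons_pos]
  · simp
  · simp

theorem pvSkip (x j : Char) (hj : j ∈ pvTails) (hxj : x ≠ j) (v u : List Char) :
    pvRep (pvTok x) v (pvTok j ++ u) = pvTok j ++ pvRep (pvTok x) v u := by
  have m : ∀ w, w ∈ pvSuf j → (pvTok x).isPrefixOf (w ++ u) = false :=
    fun w hw => pvMismatch x j hj hxj w hw u
  simp only [pvTok, List.cons_append, List.nil_append] at m ⊢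
  rw [pvRep_cons_neg _ _ _ _ (by simpa using m _ (show _ ∈ pvSuf j by simp [pvSuf] : ['x','e','2','x','8','0','x','9',j] ∈ pvSuf j)),
      pvRep_cons_neg _ _ _ _ (by simpa using m _ (show _ ∈ pvSuf j by simp [pvSuf] : ['e','2','x','8','0','x','9',j] ∈ pvSuf j)),
      pvRep_cons_neg _ _ _ _ (by simpa using m _ (show _ ∈ pvSuf j by simp [pvSuf] : ['2','x','8','0','x','9',j] ∈ pvSuf j)),
      pvRep_cons_neg _ _ _ _ (by simpa using m _ (show _ ∈ pvSuf j by simp [pvSuf] : ['x','8','0','x','9',j] ∈ pvSuf j)),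
      pvRep_cons_neg _ _ _ _ (by simpa using m _ (show _ ∈ pvSuf j by simp [pvSuf] : ['8','0','x','9',j] ∈ pvSuf j)),
      pvRep_cons_neg _ _ _ _ (by simpa using m _ (show _ ∈ pvSuf j by simp [pvSuf] : ['0','x','9',j] ∈ pvSuf j)),
      pvRep_cons_neg _ _ _ _ (by simpa using m _ (show _ ∈ pvSuf j by simp [pvSuf] : ['x','9',j] ∈ pvSuf j)),
      pvRep_cons_neg _ _ _ _ (by simpa using m _ (show _ ∈ pvSuf j by simp [pvSuf] : ['9',j] ∈ pvSuf j)),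
      pvRep_cons_neg _ _ _ _ (by simpa using m _ (show _ ∈ pvSuf j by simp [pvSuf] : [j] ∈ pvSuf j))]
theorem pvTok_mem (j : Char) : pvTok j ∈ pvSuf j := by simp [pvTok, pvSuf]

theorem pvSub_tok (j : Char) (hj : j ∈ pvTails) (u : List Char) :
    pvSub (pvTok j ++ u) =
      (if j = 'c' ∨ j = 'd' ∨ j = '4' then ' ' else '\'') :: pvSub u := by
  fin_cases hj <;>
    · simp only [pvTok, List.cons_append, List.nil_append]
      rw [pvSub]
      simp [pvTok, List.cons_prefix_cons]


-- the chain of the five sequential replace passes equals the single pass, on every string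
theorem pvChain (n : Nat) : ∀ (s : List Char), s.length ≤ n →
    pvRep (pvTok '8') ['\''] (pvRep (pvTok '9') ['\''] (pvRep (pvTok '4') [' ']
      (pvRep (pvTok 'd') [' '] (pvRep (pvTok 'c') [' '] s)))) = pvSub s := by
  induction n with
  | zero =>
    intro s hs
    have hnil : s = [] := by cases s <;> simp_all
    subst hnil
    simp [pvRep_nil, pvSub]
  | succ n ih =>
    intro s hs
    by_cases hc : pvTok 'c' <+: s
    · obtain ⟨u, rfl⟩ := hc
      have hu : u.length ≤ n := by simp [pvTok] at hs; omega
      rw [pvSelf, List.singleton_append, pvRep_vc 'd' ' ' (Or.inl rfl),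
          pvRep_vc '4' ' ' (Or.inl rfl), pvRep_vc '9' ' ' (Or.inl rfl),
          pvRep_vc '8' ' ' (Or.inl rfl), pvSub_tok 'c' (by decide), ih u hu]
      simp
    by_cases hd : pvTok 'd' <+: s
    · obtain ⟨u, rfl⟩ := hd
      have hu : u.length ≤ n := by simp [pvTok] at hs; omega
      rw [pvSkip 'c' 'd' (by decide) (by decide), pvSelf, List.singleton_append,
          pvRep_vc '4' ' ' (Or.inl rfl), pvRep_vc '9' ' ' (Or.inl rfl),
          pvRep_vc '8' ' ' (Or.inl rfl), pvSub_tok 'd' (by decide), ih u hu]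
      simp
    by_cases h4 : pvTok '4' <+: s
    · obtain ⟨u, rfl⟩ := h4
      have hu : u.length ≤ n := by simp [pvTok] at hs; omega
      rw [pvSkip 'c' '4' (by decide) (by decide), pvSkip 'd' '4' (by decide) (by decide),
          pvSelf, List.singleton_append,
          pvRep_vc '9' ' ' (Or.inl rfl), pvRep_vc '8' ' ' (Or.inl rfl),
          pvSub_tok '4' (by decide), ih u hu]
      simp
    by_cases h9 : pvTok '9' <+: s
    · obtain ⟨u, rfl⟩ := h9
      have hu : u.length ≤ n := by simp [pvTok] at hs; omega
      rw [pvSkip 'c' '9' (by decide) (by decide), pvSkip 'd' '9' (by decide) (by decide),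
          pvSkip '4' '9' (by decide) (by decide), pvSelf, List.singleton_append,
          pvRep_vc '8' '\'' (Or.inr rfl), pvSub_tok '9' (by decide), ih u hu]
      simp
    by_cases h8 : pvTok '8' <+: s
    · obtain ⟨u, rfl⟩ := h8
      have hu : u.length ≤ n := by simp [pvTok] at hs; omega
      rw [pvSkip 'c' '8' (by decide) (by decide), pvSkip 'd' '8' (by decide) (by decide),
          pvSkip '4' '8' (by decide) (by decide), pvSkip '9' '8' (by decide) (by decide),
          pvSelf, pvSub_tok '8' (by decide), ih u hu]
      simp
    · cases s with
      | nil => simp [pvRep_nil, pvSub]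
      | cons c t =>
        have ht : t.length ≤ n := by simp at hs; omega
        have hc' : (pvTok 'c').isPrefixOf (c :: t) = false := by
          rw [← Bool.not_eq_true, List.isPrefixOf_iff_prefix]; exact hc
        have hd' : (pvTok 'd').isPrefixOf (c :: t) = false := by
          rw [← Bool.not_eq_true, List.isPrefixOf_iff_prefix]; exact hd
        have h4' : (pvTok '4').isPrefixOf (c :: t) = false := by
          rw [← Bool.not_eq_true, List.isPrefixOf_iff_prefix]; exact h4
        have h9' : (pvTok '9').isPrefixOf (c :: t) = false := by
          rw [← Bool.not_eq_true, List.isPrefixOf_iff_prefix]; exact h9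
        have h8' : (pvTok '8').isPrefixOf (c :: t) = false := by
          rw [← Bool.not_eq_true, List.isPrefixOf_iff_prefix]; exact h8
        have e1 : pvRep (pvTok 'c') [' '] (c :: t) = c :: pvRep (pvTok 'c') [' '] t :=
          pvRep_cons_neg _ _ _ _ hc'
        have n2 : (pvTok 'd').isPrefixOf (c :: pvRep (pvTok 'c') [' '] t) = false := by
          by_contra h
          rw [Bool.not_eq_false, ← e1] at h
          have := pvNoCreate 'c' 'd' ' ' (by decide) (Or.inl rfl) (c :: t) (pvTok 'd')
            (Or.inl (pvTok_mem 'd')) h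
          rw [this] at hd'
          simp at hd'
        have e2 : pvRep (pvTok 'd') [' '] (c :: pvRep (pvTok 'c') [' '] t)
            = c :: pvRep (pvTok 'd') [' '] (pvRep (pvTok 'c') [' '] t) :=
          pvRep_cons_neg _ _ _ _ n2
        have n3 : (pvTok '4').isPrefixOf
            (c :: pvRep (pvTok 'd') [' '] (pvRep (pvTok 'c') [' '] t)) = false := by
          by_contra h
          rw [Bool.not_eq_false, ← e2, ← e1] at h
          have h' := pvNoCreate 'd' '4' ' ' (by decide) (Or.inl rfl) _ (pvTok '4')
            (Or.inl (pvTok_mem '4')) h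
          have h'' := pvNoCreate 'c' '4' ' ' (by decide) (Or.inl rfl) (c :: t) (pvTok '4')
            (Or.inl (pvTok_mem '4')) h'
          rw [h''] at h4'
          simp at h4'
        have e3 : pvRep (pvTok '4') [' ']
              (c :: pvRep (pvTok 'd') [' '] (pvRep (pvTok 'c') [' '] t))
            = c :: pvRep (pvTok '4') [' '] (pvRep (pvTok 'd') [' '] (pvRep (pvTok 'c') [' '] t)) :=
          pvRep_cons_neg _ _ _ _ n3
        have n4 : (pvTok '9').isPrefixOf
            (c :: pvRep (pvTok '4') [' '] (pvRep (pvTok 'd') [' '] (pvRep (pvTok 'c') [' '] t))) = false := by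
          by_contra h
          rw [Bool.not_eq_false, ← e3, ← e2, ← e1] at h
          have h1 := pvNoCreate '4' '9' ' ' (by decide) (Or.inl rfl) _ (pvTok '9')
            (Or.inl (pvTok_mem '9')) h
          have h2 := pvNoCreate 'd' '9' ' ' (by decide) (Or.inl rfl) _ (pvTok '9')
            (Or.inl (pvTok_mem '9')) h1
          have h3 := pvNoCreate 'c' '9' ' ' (by decide) (Or.inl rfl) (c :: t) (pvTok '9')
            (Or.inl (pvTok_mem '9')) h2
          rw [h3] at h9'
          simp at h9'
        have e4 : pvRep (pvTok '9') ['\'']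
              (c :: pvRep (pvTok '4') [' '] (pvRep (pvTok 'd') [' '] (pvRep (pvTok 'c') [' '] t)))
            = c :: pvRep (pvTok '9') ['\''] (pvRep (pvTok '4') [' '] (pvRep (pvTok 'd') [' '] (pvRep (pvTok 'c') [' '] t))) :=
          pvRep_cons_neg _ _ _ _ n4
        have n5 : (pvTok '8').isPrefixOf
            (c :: pvRep (pvTok '9') ['\''] (pvRep (pvTok '4') [' '] (pvRep (pvTok 'd') [' '] (pvRep (pvTok 'c') [' '] t)))) = false := by
          by_contra h
          rw [Bool.not_eq_false, ← e4, ← e3, ← e2, ← e1] at h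
          have h1 := pvNoCreate '9' '8' '\'' (by decide) (Or.inr rfl) _ (pvTok '8')
            (Or.inl (pvTok_mem '8')) h
          have h2 := pvNoCreate '4' '8' ' ' (by decide) (Or.inl rfl) _ (pvTok '8')
            (Or.inl (pvTok_mem '8')) h1
          have h3 := pvNoCreate 'd' '8' ' ' (by decide) (Or.inl rfl) _ (pvTok '8')
            (Or.inl (pvTok_mem '8')) h2
          have h4 := pvNoCreate 'c' '8' ' ' (by decide) (Or.inl rfl) (c :: t) (pvTok '8')
            (Or.inl (pvTok_mem '8')) h3
          rw [h4] at h8'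
          simp at h8'
        have e5 := pvRep_cons_neg (pvTok '8') ['\''] _ _ n5
        rw [e1, e2, e3, e4, e5, ih t ht, pvSub]
        simp [hc', hd', h4', h9', h8']

-- ===== VERDICT (by name: the statement is the Claim_ definition above) =====
theorem remove_funny_tokens_spec : Claim_equal_remove_funny_tokens := by
  intro text _
  unfold Spec_remove_funny_tokens
  unfold remove_funny_tokens remove_funny_tokens_alt
  have hitems : ((((((PySem.Dict.empty : PySem.Dict String String).insert "xe2x80x9c" " ").insert
      "xe2x80x9d" " ").insert "xe2x80x94" " ").insert "xe2x80x99" "'").insert "xe2x80x98" "'").items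
      = [("xe2x80x9c", " "), ("xe2x80x9d", " "), ("xe2x80x94", " "),
         ("xe2x80x99", "'"), ("xe2x80x98", "'")] := by decide
  rw [hitems]
  simp only [List.foldl]
  apply congrArg (fun s => PySem.Str.join " " (PySem.Str.split₀ s))
  apply String.toList_inj.mp
  simp only [PySem.Str.toList_replace]
  have t1 : "xe2x80x9c".toList = pvTok 'c' := by rfl
  have t2 : "xe2x80x9d".toList = pvTok 'd' := by rfl
  have t3 : "xe2x80x94".toList = pvTok '4' := by rfl
  have t4 : "xe2x80x99".toList = pvTok '9' := by rfl
  have t5 : "xe2x80x98".toList = pvTok '8' := by rfl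
  have v1 : " ".toList = [' '] := by rfl
  have v2 : "'".toList = ['\''] := by rfl
  rw [t1, t2, t3, t4, t5, v1, v2,
      replace_eq _ _ _ (by decide), replace_eq _ _ _ (by decide), replace_eq _ _ _ (by decide),
      replace_eq _ _ _ (by decide), replace_eq _ _ _ (by decide)]
  rw [show (String.ofList (pvSub text.toList)).toList = pvSub text.toList from by simp]
  exact pvChain text.toList.length text.toList le_rfl
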